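-- pv_equiv track=rewrite | github.com/wiberganton/OBPlanner | obplanner/strategy/helpers/find_connected.py | find_connected_points
-- ===== SOURCE A (Python) =====
-- def find_connected_points(row):
--     connected_points = []
--     current_group = []
--
--     # Iterate through the row and group consecutive points with the same energy
--     for i in range(len(row)):
--         if not current_group:
--             current_group.append(row[i])
--         elif row[i]['energy'] == current_group[-1]['energy']:
--             current_group.append(row[i])
--         else:
--             if len(current_group) > 1:  # Only keep groups with more than one connected point
--                 connected_points.append(current_group)  # Append the list directly
--             current_group = [row[i]]
--
--     # Append the last group if it's valid
--     if len(current_group) > 1: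
--         connected_points.append(current_group)
--
--     return connected_points
-- ===== SOURCE B (Python) =====
-- def find_connected_points(row):
--     # Different decomposition: consume the row run-by-run from the front,
--     # comparing each candidate against the FIRST element of the current run,
--     # and emit each run as soon as it is complete.
--     result = []
--     rest = row
--     while rest:
--         run = [rest[0]]
--         rest = rest[1:]
--         while rest and rest[0]['energy'] == run[0]['energy']:
--             run.append(rest[0])
--             rest = rest[1:]
--         if len(run) > 1:
--             result.append(run)
--     return result
-- ===== Notes on version B (the rewrite author's own statement) =====
-- stated objective: alternative
-- what changed: B consumes the row run-by-run from the front (inner loop extends the run by comparing against the run's first element, emitting each completed run immediately) instead of A's single indexed loop with a current-group accumulator flushed on energy change.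
import Mathlib
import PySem

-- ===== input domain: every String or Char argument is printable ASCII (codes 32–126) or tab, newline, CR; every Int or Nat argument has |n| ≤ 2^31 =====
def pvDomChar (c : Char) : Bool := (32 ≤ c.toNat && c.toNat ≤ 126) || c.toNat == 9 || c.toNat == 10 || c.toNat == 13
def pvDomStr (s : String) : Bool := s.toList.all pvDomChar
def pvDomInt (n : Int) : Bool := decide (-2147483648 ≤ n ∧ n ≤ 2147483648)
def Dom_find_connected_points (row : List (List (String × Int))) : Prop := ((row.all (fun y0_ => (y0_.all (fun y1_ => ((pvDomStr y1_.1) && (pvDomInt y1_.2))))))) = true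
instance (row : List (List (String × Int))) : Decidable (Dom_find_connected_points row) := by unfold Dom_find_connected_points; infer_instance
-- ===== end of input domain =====

-- B groups the row run-by-run from the front instead of A's flush-on-change accumulator; equal return value on Pre_.

-- p['energy'] for an association-list dict (first match); none = KeyError (excluded by Pre_)
def pvEnergy (p : List (String × Int)) : Option Int := (PySem.Dict.mk p).get? "energy"

-- ===== PORT A =====
-- one iteration of A's for-loop; state = (connected_points, current_group)
def pvStepA (st : List (List (List (String × Int))) × List (List (String × Int)))
    (p : List (String × Int)) :
    List (List (List (String × Int))) × List (List (String × Int)) :=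
  match st with
  | (cps, cg) =>
    if cg = [] then (cps, cg ++ [p])
    else if pvEnergy p = (PySem.List.pyGet? cg (-1)).bind pvEnergy then (cps, cg ++ [p])
    else if cg.length > 1 then (cps ++ [cg], [p]) else (cps, [p])

def find_connected_points (row : List (List (String × Int))) : List (List (List (String × Int))) :=
  match row.foldl pvStepA ([], []) with
  | (cps, cg) => if cg.length > 1 then cps ++ [cg] else cps

-- ===== PORT B =====
-- inner while loop of B: extend the run while the next point has energy e; returns (taken, rest)
def pvTakeRun (e : Option Int) : List (List (String × Int)) →
    List (List (String × Int)) × List (List (String × Int))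
  | [] => ([], [])
  | p :: t =>
    if pvEnergy p = e then
      let r := pvTakeRun e t
      (p :: r.1, r.2)
    else ([], p :: t)

theorem pvTakeRun_rest_le (e : Option Int) (t : List (List (String × Int))) :
    (pvTakeRun e t).2.length ≤ t.length := by
  induction t with
  | nil => simp [pvTakeRun]
  | cons p t ih =>
    simp only [pvTakeRun]
    split
    · simpa using le_trans ih (Nat.le_succ _)
    · simp

-- outer while loop of B
def pvLoopB : List (List (String × Int)) → List (List (List (String × Int)))
  | [] => []
  | p :: t =>
    let tr := pvTakeRun (pvEnergy p) t
    let run := p :: tr.1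
    if run.length > 1 then run :: pvLoopB tr.2 else pvLoopB tr.2
termination_by l => l.length
decreasing_by all_goals
  exact Nat.lt_succ_of_le (pvTakeRun_rest_le _ _)

def find_connected_points_alt (row : List (List (String × Int))) : List (List (List (String × Int))) :=
  pvLoopB row

-- ===== PRECONDITION & SPEC =====
-- Pre_ excludes exactly the inputs where Python A raises KeyError: rows of length ≥ 2
-- containing an element without an 'energy' key (B raises there too).
def Pre_find_connected_points (row : List (List (String × Int))) : Prop :=
  row.length ≤ 1 ∨ ∀ p ∈ row, (pvEnergy p).isSome = true
instance (row : List (List (String × Int))) : Decidable (Pre_find_connected_points row) := by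
  unfold Pre_find_connected_points; infer_instance

def pvWitness_find_connected_points : (List (List (String × Int))) :=
  [[("energy", 1)], [("energy", 1)], [("energy", 2)]]

def Spec_find_connected_points (row : List (List (String × Int))) (out : List (List (List (String × Int)))) : Prop := out = find_connected_points_alt row
instance (row : List (List (String × Int))) (out : List (List (List (String × Int)))) : Decidable (Spec_find_connected_points row out) := by unfold Spec_find_connected_points; infer_instance

-- ===== CLAIM (what is proved, stated in full; the proofs are below) =====
def Claim_equal_find_connected_points : Prop := ∀ (row : List (List (String × Int))), Dom_find_connected_points row → Pre_find_connected_points row → Spec_find_connected_points row (find_connected_points row)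

-- ===== LEMMAS AND PROOFS =====

theorem pvMain (rest : List (List (String × Int)))
    (cps : List (List (List (String × Int)))) (cg : List (List (String × Int)))
    (e : Option Int) (hcg : cg ≠ [])
    (hlast : (PySem.List.pyGet? cg (-1)).bind pvEnergy = e) :
    (if (rest.foldl pvStepA (cps, cg)).2.length > 1
     then (rest.foldl pvStepA (cps, cg)).1 ++ [(rest.foldl pvStepA (cps, cg)).2]
     else (rest.foldl pvStepA (cps, cg)).1)
    = cps ++ ((if (cg ++ (pvTakeRun e rest).1).length > 1
               then [cg ++ (pvTakeRun e rest).1] else [])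
              ++ pvLoopB (pvTakeRun e rest).2) := by
  induction rest generalizing cps cg e with
  | nil =>
    simp only [List.foldl_nil, pvTakeRun, List.append_nil, pvLoopB]
    split <;> simp
  | cons p t ih =>
    simp only [List.foldl_cons, pvStepA, if_neg hcg]
    by_cases he : pvEnergy p = e
    · rw [hlast, if_pos he]
      have h1 : cg ++ [p] ≠ [] := by simp
      have h2 : (PySem.List.pyGet? (cg ++ [p]) (-1)).bind pvEnergy = pvEnergy p := by
        rw [PySem.List.pyGet?_neg_one_append_singleton]; rfl
      rw [ih cps (cg ++ [p]) e h1 (by rw [h2, he])]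
      simp only [pvTakeRun, if_pos he, List.append_assoc, List.cons_append, List.nil_append]
    · rw [hlast, if_neg he]
      have hrun : pvTakeRun e (p :: t) = ([], p :: t) := by
        simp [pvTakeRun, he]
      have hloop : pvLoopB (p :: t)
          = (if (p :: (pvTakeRun (pvEnergy p) t).1).length > 1
             then [p :: (pvTakeRun (pvEnergy p) t).1] else [])
            ++ pvLoopB (pvTakeRun (pvEnergy p) t).2 := by
        rw [pvLoopB]
        split <;> simp
      have hp : ([p] : List (List (String × Int))) ≠ [] := by simp
      have hpl : (PySem.List.pyGet? [p] (-1)).bind pvEnergy = pvEnergy p := by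
        simp [PySem.List.pyGet?_neg_one]
      by_cases hlen : cg.length > 1
      · rw [if_pos hlen, ih (cps ++ [cg]) [p] (pvEnergy p) hp hpl]
        rw [hrun, hloop]
        simp [hlen]
      · rw [if_neg hlen, ih cps [p] (pvEnergy p) hp hpl]
        rw [hrun, hloop]
        simp
        omega

-- ===== VERDICT (by name: the statement is the Claim_ definition above) =====
theorem find_connected_points_spec : Claim_equal_find_connected_points := by
  intro row _ _
  unfold Spec_find_connected_points find_connected_points find_connected_points_alt
  cases row with
  | nil => simp [pvLoopB]
  | cons p t =>
    have h0 : (p :: t).foldl pvStepA ([], []) = t.foldl pvStepA ([], [p]) := by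
      simp [pvStepA]
    show (if ((p :: t).foldl pvStepA ([], [])).2.length > 1
          then ((p :: t).foldl pvStepA ([], [])).1 ++ [((p :: t).foldl pvStepA ([], [])).2]
          else ((p :: t).foldl pvStepA ([], [])).1) = pvLoopB (p :: t)
    rw [h0, pvMain t [] [p] (pvEnergy p) (by simp) (by simp [PySem.List.pyGet?_neg_one])]
    rw [pvLoopB]
    split <;> simp_all
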